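-- pv_equiv track=rewrite | github.com/sofiakhn/IntroArtificialIntelligence | hw3/nqueens.py | f
-- ===== SOURCE A (Python) =====
-- def f(state):
--     attacked = 0
--     n = len(state)
--
--     for big_pointer in range(n):  #big POINTER
--         row_A = state[big_pointer]
--
--         for small_pointer in range(n): #check for queens in same row and same diagonal
--             if(big_pointer==small_pointer):
--                 continue
--             row_B = state[small_pointer]
--
--             if row_A == row_B : ## queens in same row
--                 attacked += 1
--                 break
--             elif abs(row_A-row_B) == abs(big_pointer-small_pointer):
--                 attacked += 1
--                 break
--
--     return attacked
-- ===== SOURCE B (Python) =====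
-- def f(state):
--     rows = {}
--     diags = {}
--     antis = {}
--     for i, r in enumerate(state):
--         rows[r] = rows.get(r, 0) + 1
--         diags[r - i] = diags.get(r - i, 0) + 1
--         antis[r + i] = antis.get(r + i, 0) + 1
--     attacked = 0
--     for i, r in enumerate(state):
--         if rows[r] > 1 or diags[r - i] > 1 or antis[r + i] > 1:
--             attacked += 1
--     return attacked
-- ===== Notes on version B (the rewrite author's own statement) =====
-- stated objective: faster
-- what changed: Replaces the quadratic per-queen scan (with break) by one pass that counts occupancy of each row, diagonal and anti-diagonal in three hash maps, then marks a queen attacked iff any of its three counts exceeds 1.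
import Mathlib
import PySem

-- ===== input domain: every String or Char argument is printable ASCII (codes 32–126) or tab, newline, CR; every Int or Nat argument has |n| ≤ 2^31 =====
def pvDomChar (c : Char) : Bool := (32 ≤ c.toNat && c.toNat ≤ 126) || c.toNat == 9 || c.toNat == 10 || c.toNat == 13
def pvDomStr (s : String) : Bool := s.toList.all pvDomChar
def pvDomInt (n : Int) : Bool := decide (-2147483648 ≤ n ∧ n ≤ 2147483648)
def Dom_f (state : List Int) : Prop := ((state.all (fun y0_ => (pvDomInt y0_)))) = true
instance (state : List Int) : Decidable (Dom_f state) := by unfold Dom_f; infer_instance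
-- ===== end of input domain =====

-- B replaces A's quadratic per-queen rescan by a single pass counting row/diagonal/anti-diagonal occupancy in three dicts.


-- ===== PORT A =====
-- the inner 'for small_pointer in range(n)' with its break: returns the increment (1 on break, 0 if the loop runs out)
def fInner (state : List Int) (rowA i : Int) : List Int → Int
  | [] => 0
  | j :: rest =>
      if i = j then fInner state rowA i rest
      else
        let rowB := PySem.List.pyGetD state j 0
        if rowA = rowB then 1
        else if |rowA - rowB| = |i - j| then 1
        else fInner state rowA i rest

def f (state : List Int) : Int :=
  let n : Int := PySem.List.len state
  (PySem.List.pyRange 0 n 1).foldl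
    (fun attacked i =>
      attacked + fInner state (PySem.List.pyGetD state i 0) i (PySem.List.pyRange 0 n 1)) 0

-- ===== PORT B =====
def f_alt (state : List Int) : Int :=
  let cs := (PySem.List.enumerate state 0).foldl
    (fun (t : PySem.Dict Int Int × PySem.Dict Int Int × PySem.Dict Int Int) p =>
      (t.1.insert p.2 (t.1.getD p.2 0 + 1),
       t.2.1.insert (p.2 - p.1) (t.2.1.getD (p.2 - p.1) 0 + 1),
       t.2.2.insert (p.2 + p.1) (t.2.2.getD (p.2 + p.1) 0 + 1)))
    (PySem.Dict.empty, PySem.Dict.empty, PySem.Dict.empty)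
  (PySem.List.enumerate state 0).foldl
    (fun attacked p =>
      if 1 < cs.1.getD p.2 0 ∨ 1 < cs.2.1.getD (p.2 - p.1) 0 ∨ 1 < cs.2.2.getD (p.2 + p.1) 0
      then attacked + 1 else attacked) 0

-- ===== PRECONDITION & SPEC =====
def Spec_f (state : List Int) (out : Int) : Prop := out = f_alt state
instance (state : List Int) (out : Int) : Decidable (Spec_f state out) := by unfold Spec_f; infer_instance

-- ===== CLAIM (what is proved, stated in full; the proofs are below) =====
def Claim_equal_f : Prop := ∀ (state : List Int), Dom_f state → Spec_f state (f state)

-- ===== LEMMAS AND PROOFS =====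

-- "queen k is attacked", read off A's inner scan
abbrev condA (state : List Int) (k : Nat) : Prop :=
  ∃ m ∈ List.range state.length, m ≠ k ∧
    (state.getD k 0 = state.getD m 0 ∨
     |state.getD k 0 - state.getD m 0| = |(k : Int) - (m : Int)|)

-- the per-index diagonal / anti-diagonal keys B counts
def dkeys (state : List Int) : List Int := (PySem.List.enumerate state 0).map (fun p => p.2 - p.1)
def akeys (state : List Int) : List Int := (PySem.List.enumerate state 0).map (fun p => p.2 + p.1)

-- "queen k is attacked", read off B's counters
abbrev condB (state : List Int) (k : Nat) : Prop :=
  1 < state.count (state.getD k 0) ∨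
  1 < (dkeys state).count (state.getD k 0 - k) ∨
  1 < (akeys state).count (state.getD k 0 + k)

theorem fInner_eq (state : List Int) (rowA i : Int) (js : List Int) :
    fInner state rowA i js =
      if ∃ j ∈ js, j ≠ i ∧ (rowA = PySem.List.pyGetD state j 0 ∨
          |rowA - PySem.List.pyGetD state j 0| = |i - j|) then 1 else 0 := by
  induction js with
  | nil => simp [fInner]
  | cons j rest ih =>
    simp only [fInner, ih, List.exists_mem_cons_iff]
    by_cases hij : i = j <;>
      by_cases h1 : rowA = PySem.List.pyGetD state j 0 <;>
      by_cases h2 : |rowA - PySem.List.pyGetD state j 0| = |i - j| <;>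
      by_cases hE : ∃ x ∈ rest, x ≠ i ∧ (rowA = PySem.List.pyGetD state x 0 ∨
          |rowA - PySem.List.pyGetD state x 0| = |i - x|) <;>
      simp [hij, h1, h2, hE] <;> tauto

theorem f_eq_sum (state : List Int) :
    f state = ((List.range state.length).map
      (fun k => if condA state k then (1 : Int) else 0)).sum := by
  unfold f
  rw [PySem.List.foldl_add]
  rw [PySem.List.pyRange_one]
  simp only [PySem.List.len_eq, sub_zero, Int.toNat_natCast, List.map_map, zero_add]
  congr 1
  refine List.map_congr_left ?_
  intro k hk
  rw [List.mem_range] at hk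
  simp only [Function.comp_apply]
  rw [fInner_eq]
  congr 1
  simp only [eq_iff_iff]
  constructor
  · rintro ⟨j, hj, hne, hc⟩
    rw [List.mem_map] at hj
    obtain ⟨m, hm, rfl⟩ := hj
    rw [List.mem_range] at hm
    refine ⟨m, List.mem_range.mpr hm, ?_, ?_⟩
    · intro h; exact hne (by simp [h])
    · rw [PySem.List.pyGetD_natCast state k 0, PySem.List.pyGetD_natCast state m 0] at hc
      simpa using hc
  · rintro ⟨m, hm, hne, hc⟩
    rw [List.mem_range] at hm
    refine ⟨(m : Int), List.mem_map.mpr ⟨m, List.mem_range.mpr hm, by simp⟩, ?_, ?_⟩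
    · simpa using fun h => hne (by exact_mod_cast h)
    · rw [PySem.List.pyGetD_natCast state k 0, PySem.List.pyGetD_natCast state m 0]
      simpa using hc

-- B's loop over one triple of dicts is three independent counting loops
theorem foldl_triple (l : List (Int × Int)) (d1 d2 d3 : PySem.Dict Int Int) :
    l.foldl
      (fun (t : PySem.Dict Int Int × PySem.Dict Int Int × PySem.Dict Int Int) p =>
        (t.1.insert p.2 (t.1.getD p.2 0 + 1),
         t.2.1.insert (p.2 - p.1) (t.2.1.getD (p.2 - p.1) 0 + 1),
         t.2.2.insert (p.2 + p.1) (t.2.2.getD (p.2 + p.1) 0 + 1))) (d1, d2, d3)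
    = (l.foldl (fun d p => d.insert p.2 (d.getD p.2 0 + 1)) d1,
       l.foldl (fun d p => d.insert (p.2 - p.1) (d.getD (p.2 - p.1) 0 + 1)) d2,
       l.foldl (fun d p => d.insert (p.2 + p.1) (d.getD (p.2 + p.1) 0 + 1)) d3) := by
  induction l generalizing d1 d2 d3 with
  | nil => rfl
  | cons p l ih => simp [List.foldl_cons, ih]

theorem cs1_count (state : List Int) (v : Int) :
    ((PySem.List.enumerate state 0).foldl
      (fun (d : PySem.Dict Int Int) p => d.insert p.2 (d.getD p.2 0 + 1))
      PySem.Dict.empty).getD v 0 = (state.count v : Int) := by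
  have h := List.foldl_map (f := fun p : Int × Int => p.2) (g := fun (d : PySem.Dict Int Int) x => d.insert x (d.getD x 0 + 1)) (l := PySem.List.enumerate state 0) (init := PySem.Dict.empty)
  rw [← h]
  rw [show List.map (fun p : Int × Int => p.2) (PySem.List.enumerate state 0) = state from PySem.List.map_snd_enumerate ..]
  rw [PySem.Dict.foldl_insert_getD_add_one_eq_counter]
  rw [PySem.Dict.getD_counter]

theorem cs2_count (state : List Int) (v : Int) :
    ((PySem.List.enumerate state 0).foldl
      (fun (d : PySem.Dict Int Int) p => d.insert (p.2 - p.1) (d.getD (p.2 - p.1) 0 + 1))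
      PySem.Dict.empty).getD v 0 = ((dkeys state).count v : Int) := by
  have h := List.foldl_map (f := fun p : Int × Int => p.2 - p.1) (g := fun (d : PySem.Dict Int Int) x => d.insert x (d.getD x 0 + 1)) (l := PySem.List.enumerate state 0) (init := PySem.Dict.empty)
  rw [← h]
  show _ = ((dkeys state).count v : Int)
  rw [show List.map (fun p : Int × Int => p.2 - p.1) (PySem.List.enumerate state 0) = dkeys state from rfl]
  rw [PySem.Dict.foldl_insert_getD_add_one_eq_counter]
  rw [PySem.Dict.getD_counter]

theorem cs3_count (state : List Int) (v : Int) :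
    ((PySem.List.enumerate state 0).foldl
      (fun (d : PySem.Dict Int Int) p => d.insert (p.2 + p.1) (d.getD (p.2 + p.1) 0 + 1))
      PySem.Dict.empty).getD v 0 = ((akeys state).count v : Int) := by
  have h := List.foldl_map (f := fun p : Int × Int => p.2 + p.1) (g := fun (d : PySem.Dict Int Int) x => d.insert x (d.getD x 0 + 1)) (l := PySem.List.enumerate state 0) (init := PySem.Dict.empty)
  rw [← h]
  show _ = ((akeys state).count v : Int)
  rw [show List.map (fun p : Int × Int => p.2 + p.1) (PySem.List.enumerate state 0) = akeys state from rfl]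
  rw [PySem.Dict.foldl_insert_getD_add_one_eq_counter]
  rw [PySem.Dict.getD_counter]

theorem f_alt_eq_sum (state : List Int) :
    f_alt state = ((List.range state.length).map
      (fun k => if condB state k then (1 : Int) else 0)).sum := by
  unfold f_alt
  rw [foldl_triple]
  simp only [cs1_count, cs2_count, cs3_count]
  rw [PySem.List.foldl_ite_add_one]
  rw [PySem.List.enumerate_eq_map_pyRange (d := 0)]
  rw [List.countP_map]
  rw [PySem.List.pyRange_one]
  simp only [PySem.List.len_eq, sub_zero, Int.toNat_natCast]
  rw [List.countP_map]
  rw [zero_add]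
  rw [show (fun k => if condB state k then (1:Int) else 0)
      = (fun k => if decide (condB state k) = true then (1:Int) else 0) from by
    funext k; simp only [decide_eq_true_eq]]
  rw [PySem.List.sum_map_ite_one_zero]
  norm_cast
  apply List.countP_congr
  intro k hk
  rw [List.mem_range] at hk
  simp only [Function.comp_apply, zero_add, PySem.List.pyGetD_natCast]

theorem count_gt_one (l : List Int) (k : Nat) (hk : k < l.length) :
    1 < l.count l[k] ↔ ∃ m, m < l.length ∧ m ≠ k ∧ l.getD m 0 = l[k] := by
  show 2 ≤ List.count l[k] l ↔ _
  rw [← List.duplicate_iff_two_le_count]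
  rw [List.duplicate_iff_exists_distinct_get]
  constructor
  · rintro ⟨n, m, hnm, hn, hm⟩
    by_cases h : (n : Nat) = k
    · exact ⟨m, m.isLt, by omega, by rw [List.getD_eq_getElem _ _ m.isLt]; simpa using hm.symm⟩
    · exact ⟨n, n.isLt, h, by rw [List.getD_eq_getElem _ _ n.isLt]; simpa using hn.symm⟩
  · rintro ⟨m, hm, hne, hv⟩
    rw [List.getD_eq_getElem _ _ hm] at hv
    rcases Nat.lt_or_gt_of_ne hne with h | h
    · exact ⟨⟨m, hm⟩, ⟨k, hk⟩, by simpa using h, by simpa using hv.symm, by simp⟩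
    · exact ⟨⟨k, hk⟩, ⟨m, hm⟩, by simpa using h, by simp, by simpa using hv.symm⟩

theorem dkeys_length (state : List Int) : (dkeys state).length = state.length := by
  simp [dkeys, PySem.List.length_enumerate]
theorem akeys_length (state : List Int) : (akeys state).length = state.length := by
  simp [akeys, PySem.List.length_enumerate]
theorem dkeys_getElem (state : List Int) (m : Nat) (hm : m < state.length) :
    (dkeys state)[m]'(by rw [dkeys_length]; exact hm) = state[m] - m := by
  simp [dkeys, PySem.List.getElem_enumerate]
theorem akeys_getElem (state : List Int) (m : Nat) (hm : m < state.length) :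
    (akeys state)[m]'(by rw [akeys_length]; exact hm) = state[m] + m := by
  simp [akeys, PySem.List.getElem_enumerate]
theorem dkeys_getD (state : List Int) (m : Nat) (hm : m < state.length) :
    (dkeys state).getD m 0 = state[m] - m := by
  rw [List.getD_eq_getElem _ _ (by rw [dkeys_length]; exact hm), dkeys_getElem state m hm]
theorem akeys_getD (state : List Int) (m : Nat) (hm : m < state.length) :
    (akeys state).getD m 0 = state[m] + m := by
  rw [List.getD_eq_getElem _ _ (by rw [akeys_length]; exact hm), akeys_getElem state m hm]

theorem cond_iff (state : List Int) (k : Nat) (hk : k < state.length) :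
    condA state k ↔ condB state k := by
  have hgk : state.getD k 0 = state[k] := List.getD_eq_getElem _ _ hk
  have h1 : (1 < state.count (state.getD k 0)) ↔
      ∃ m, m < state.length ∧ m ≠ k ∧ state.getD m 0 = state[k] := by
    rw [hgk]; exact count_gt_one state k hk
  have hdk : state.getD k 0 - (k : Int) = (dkeys state)[k]'(by rw [dkeys_length]; exact hk) := by
    rw [hgk, dkeys_getElem state k hk]
  have hak : state.getD k 0 + (k : Int) = (akeys state)[k]'(by rw [akeys_length]; exact hk) := by
    rw [hgk, akeys_getElem state k hk]
  have h2 : (1 < (dkeys state).count (state.getD k 0 - k)) ↔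
      ∃ m, m < state.length ∧ m ≠ k ∧ state.getD m 0 - (m : Int) = state[k] - k := by
    rw [hdk, count_gt_one (dkeys state) k (by rw [dkeys_length]; exact hk)]
    simp only [dkeys_length]
    constructor
    · rintro ⟨m, hm, hne, hv⟩
      rw [dkeys_getD state m hm, dkeys_getElem state k hk] at hv
      exact ⟨m, hm, hne, by rw [List.getD_eq_getElem _ _ hm]; exact hv⟩
    · rintro ⟨m, hm, hne, hv⟩
      rw [List.getD_eq_getElem _ _ hm] at hv
      exact ⟨m, hm, hne, by rw [dkeys_getD state m hm, dkeys_getElem state k hk]; exact hv⟩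
  have h3 : (1 < (akeys state).count (state.getD k 0 + k)) ↔
      ∃ m, m < state.length ∧ m ≠ k ∧ state.getD m 0 + (m : Int) = state[k] + k := by
    rw [hak, count_gt_one (akeys state) k (by rw [akeys_length]; exact hk)]
    simp only [akeys_length]
    constructor
    · rintro ⟨m, hm, hne, hv⟩
      rw [akeys_getD state m hm, akeys_getElem state k hk] at hv
      exact ⟨m, hm, hne, by rw [List.getD_eq_getElem _ _ hm]; exact hv⟩
    · rintro ⟨m, hm, hne, hv⟩
      rw [List.getD_eq_getElem _ _ hm] at hv
      exact ⟨m, hm, hne, by rw [akeys_getD state m hm, akeys_getElem state k hk]; exact hv⟩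
  rw [condB, h1, h2, h3]
  constructor
  · rintro ⟨m, hmr, hne, hc⟩
    rw [List.mem_range] at hmr
    have hgm : state.getD m 0 = state[m] := List.getD_eq_getElem _ _ hmr
    rcases hc with hc | hc
    · exact Or.inl ⟨m, hmr, hne, by rw [← hc, hgk]⟩
    · rw [hgk, hgm] at hc
      rcases abs_eq_abs.mp hc with h | h
      · exact Or.inr (Or.inl ⟨m, hmr, hne, by rw [hgm]; omega⟩)
      · exact Or.inr (Or.inr ⟨m, hmr, hne, by rw [hgm]; omega⟩)
  · rintro (⟨m, hm, hne, hv⟩ | ⟨m, hm, hne, hv⟩ | ⟨m, hm, hne, hv⟩)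
    · exact ⟨m, List.mem_range.mpr hm, hne,
        Or.inl (by rw [hgk, List.getD_eq_getElem _ _ hm] at *; exact hv.symm)⟩
    · refine ⟨m, List.mem_range.mpr hm, hne, Or.inr ?_⟩
      rw [List.getD_eq_getElem _ _ hm] at hv
      rw [hgk, List.getD_eq_getElem _ _ hm]
      rw [abs_eq_abs]; omega
    · refine ⟨m, List.mem_range.mpr hm, hne, Or.inr ?_⟩
      rw [List.getD_eq_getElem _ _ hm] at hv
      rw [hgk, List.getD_eq_getElem _ _ hm]
      rw [abs_eq_abs]; omega

-- ===== VERDICT (by name: the statement is the Claim_ definition above) =====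
theorem f_spec : Claim_equal_f := by
  intro state _
  unfold Spec_f
  rw [f_eq_sum, f_alt_eq_sum]
  congr 1
  refine List.map_congr_left ?_
  intro k hk
  rw [List.mem_range] at hk
  simp [cond_iff state k hk]
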